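-- pv_equiv track=rewrite | github.com/Teixeira007/chat-socket-criptografado | encryption.py | crypt_message_ascii
-- ===== SOURCE A (Python) =====
-- def crypt_message_ascii(message, key):
--     ascii = []
--     for character in message:
--         value_ascii = ord(character)
--         value_ascii = (value_ascii + int(key[:2])) % 127
--
--         ascii.append(value_ascii)
--
--     message_cript = ''.join(chr(value) for value in ascii)
--     return message_cript
-- ===== SOURCE B (Python) =====
-- def crypt_message_ascii(message, key):
--     if not message:
--         return ''
--     s = int(key[:2]) % 127
--     alphabet = ''.join(map(chr, range(127)))
--     rotated = alphabet[s:] + alphabet[:s]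
--     return ''.join(rotated[ord(c)] for c in message)
-- ===== Notes on version B (the rewrite author's own statement) =====
-- stated objective: alternative
-- what changed: B computes the shift once, builds the rotated 127-character alphabet by string slicing (alphabet[s:]+alphabet[:s]) and maps each character by indexing into that rotated table, instead of A's append loop that re-parses int(key[:2]) and does the modular arithmetic per character.
import Mathlib
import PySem

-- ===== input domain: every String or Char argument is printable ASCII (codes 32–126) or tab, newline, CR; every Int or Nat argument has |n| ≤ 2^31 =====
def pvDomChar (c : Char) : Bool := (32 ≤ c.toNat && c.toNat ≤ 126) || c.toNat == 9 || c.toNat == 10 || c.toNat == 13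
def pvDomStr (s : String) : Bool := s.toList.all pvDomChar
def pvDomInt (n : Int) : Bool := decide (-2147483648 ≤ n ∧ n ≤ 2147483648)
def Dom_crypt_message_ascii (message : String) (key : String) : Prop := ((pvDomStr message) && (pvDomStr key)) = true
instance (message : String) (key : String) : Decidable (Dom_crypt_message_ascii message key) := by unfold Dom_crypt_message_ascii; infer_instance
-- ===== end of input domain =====

-- B replaces A's per-character modular arithmetic with a pre-rotated alphabet string built once by slicing,
-- then a plain table lookup per character (alternative algorithm; return-value equivalence only).

-- ===== PORT A =====
-- int(key[:2]) is evaluated inside the loop, once per character; under Pre_ it parses on a nonempty message,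
-- so getD 0 is never the default on an admitted input that reaches it.
def crypt_message_ascii (message : String) (key : String) : String :=
  let ascii := message.toList.foldl
    (fun acc c =>
      acc ++ [PySem.Int.mod ((c.toNat : Int) + (PySem.Int.ofStr? (PySem.Str.slice key none (some 2))).getD 0) 127]) []
  String.ofList (ascii.map (fun v => Char.ofNat v.toNat))

-- ===== PORT B =====
-- rotated[ord(c)] would be IndexError only for ord(c) ≥ 127, which Dom excludes; getD c is the total form there.
def crypt_message_ascii_alt (message : String) (key : String) : String :=
  if message.toList = [] then "" else
    let s := PySem.Int.mod ((PySem.Int.ofStr? (PySem.Str.slice key none (some 2))).getD 0) 127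
    let alphabet := (PySem.List.pyRange 0 127 1).map (fun v => Char.ofNat v.toNat)
    let rotated := PySem.List.slice alphabet (some s) none ++ PySem.List.slice alphabet none (some s)
    String.ofList (message.toList.map (fun c => (PySem.List.pyGet? rotated ((c.toNat : Int))).getD c))

-- ===== PRECONDITION & SPEC =====
-- Pre_ excludes exactly the inputs where Python A raises ValueError: a nonempty message with a key whose first two
-- characters do not parse as an int (on an empty message A never evaluates int(key[:2]) and returns '').
def Pre_crypt_message_ascii (message : String) (key : String) : Prop :=
  message.toList = [] ∨ (PySem.Int.ofStr? (PySem.Str.slice key none (some 2))).isSome = true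
instance (message : String) (key : String) : Decidable (Pre_crypt_message_ascii message key) := by
  unfold Pre_crypt_message_ascii; infer_instance

def pvWitness_crypt_message_ascii : String × String := ("ab", "10")

def Spec_crypt_message_ascii (message : String) (key : String) (out : String) : Prop := out = crypt_message_ascii_alt message key
instance (message : String) (key : String) (out : String) : Decidable (Spec_crypt_message_ascii message key out) := by unfold Spec_crypt_message_ascii; infer_instance

-- ===== CLAIM (what is proved, stated in full; the proofs are below) =====
def Claim_equal_crypt_message_ascii : Prop := ∀ (message : String) (key : String), Dom_crypt_message_ascii message key → Pre_crypt_message_ascii message key → Spec_crypt_message_ascii message key (crypt_message_ascii message key)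

-- ===== LEMMAS AND PROOFS =====

-- per-character agreement: A's chr((v + shift) % 127) is B's rotated-alphabet lookup at index v, for v ≤ 126
theorem pv_char_rot (shift : Int) (c : Char) (hv : c.toNat ≤ 126) :
    ((PySem.List.pyGet?
        (PySem.List.slice ((PySem.List.pyRange 0 127 1).map (fun v => Char.ofNat v.toNat)) (some (PySem.Int.mod shift 127)) none ++
         PySem.List.slice ((PySem.List.pyRange 0 127 1).map (fun v => Char.ofNat v.toNat)) none (some (PySem.Int.mod shift 127)))
        ((c.toNat : Int))).getD c)
      = Char.ofNat (PySem.Int.mod ((c.toNat : Int) + shift) 127).toNat := by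
  have hse : PySem.Int.mod shift 127 = shift % 127 := PySem.Int.mod_eq_emod_of_pos (by norm_num)
  have hse2 : PySem.Int.mod ((c.toNat : Int) + shift) 127 = ((c.toNat : Int) + shift) % 127 :=
    PySem.Int.mod_eq_emod_of_pos (by norm_num)
  have hs0 : (0:Int) ≤ shift % 127 := Int.emod_nonneg _ (by norm_num)
  have hslt : shift % 127 < 127 := Int.emod_lt_of_pos _ (by norm_num)
  rw [hse, hse2, PySem.List.slice_from _ hs0, PySem.List.slice_to _ hs0]
  have halpha : (PySem.List.pyRange 0 127 1).map (fun v => Char.ofNat v.toNat) = (List.range 127).map Char.ofNat := by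
    rw [PySem.List.pyRange_one]
    rw [List.map_map]
    apply List.map_congr_left
    intro k _
    simp
  rw [halpha]
  set sn := (shift % 127).toNat with hsndef
  have hsnlt : sn < 127 := by omega
  have hvlt : c.toNat < 127 := by omega
  rw [PySem.List.pyGet?_natCast]
  have hlen : (((List.range 127).map Char.ofNat).drop sn ++ ((List.range 127).map Char.ofNat).take sn).length = 127 := by
    simp; omega
  rw [List.getElem?_eq_getElem (by omega)]
  simp only [Option.getD_some]
  by_cases hsplit : c.toNat < 127 - sn
  · rw [List.getElem_append_left (by simp; omega)]
    rw [List.getElem_drop, List.getElem_map, List.getElem_range]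
    congr 1
    omega
  · rw [List.getElem_append_right (by simp; omega)]
    rw [List.getElem_take, List.getElem_map, List.getElem_range]
    congr 1
    simp only [List.length_drop, List.length_map, List.length_range]
    omega

-- ===== VERDICT (by name: the statement is the Claim_ definition above) =====
theorem crypt_message_ascii_spec : Claim_equal_crypt_message_ascii := by
  intro message key hdom _
  unfold Spec_crypt_message_ascii crypt_message_ascii crypt_message_ascii_alt
  by_cases hm : message.toList = []
  · simp [hm]
  · simp only [if_neg hm]
    rw [PySem.List.foldl_append_singleton_eq_map]
    rw [List.nil_append, List.map_map]
    refine congrArg String.ofList ?_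
    apply List.map_congr_left
    intro c hc
    have hdc : pvDomChar c = true := by
      unfold Dom_crypt_message_ascii pvDomStr at hdom
      simp only [Bool.and_eq_true, List.all_eq_true] at hdom
      exact hdom.1 c hc
    have hv : c.toNat ≤ 126 := by
      unfold pvDomChar at hdc
      simp only [Bool.or_eq_true, Bool.and_eq_true, decide_eq_true_eq, beq_iff_eq] at hdc
      omega
    simp only [Function.comp_apply]
    exact (pv_char_rot ((PySem.Int.ofStr? (PySem.Str.slice key none (some 2))).getD 0) c hv).symm
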